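-- pv_equiv track=rewrite | github.com/Vkartik-3/FRA_final | fra_pipeline/scripts/fra_gluing_algorithm.py | can_satisfy_remaining
-- ===== SOURCE A (Python) =====
-- from collections import defaultdict, deque
--
-- def can_satisfy_remaining(unused, district_adj, remaining_sizes):
--     """
--     Check if the remaining unused districts can satisfy the remaining target sizes.
--
--     This is a simple heuristic check - we verify that the unused districts
--     form enough connected components of appropriate sizes.
--
--     Args:
--         unused: Set of unused district IDs
--         district_adj: Dictionary of district adjacencies
--         remaining_sizes: List of remaining super-district sizes
--
--     Returns:
--         True if remaining sizes can potentially be satisfied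
--     """
--     if not remaining_sizes:
--         return len(unused) == 0
--
--     # Find connected components in unused districts
--     components = []
--     visited = set()
--
--     for start in unused:
--         if start in visited:
--             continue
--
--         # BFS to find component
--         component = {start}
--         visited.add(start)
--         queue = deque([start])
--
--         while queue:
--             current = queue.popleft()
--             for neighbor in district_adj.get(current, set()):
--                 if neighbor in unused and neighbor not in visited:
--                     visited.add(neighbor)
--                     component.add(neighbor)
--                     queue.append(neighbor)
--
--         components.append(component)
--
--     # Check if we can partition components into remaining sizes
--     component_sizes = sorted([len(c) for c in components], reverse=True)
--     required_sizes = sorted(remaining_sizes, reverse=True)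
--
--     # Simple check: total must match
--     if sum(component_sizes) != sum(required_sizes):
--         return False
--
--     # For now, just check that the largest component can fit the largest requirement
--     if component_sizes and required_sizes:
--         if component_sizes[0] < required_sizes[0]:
--             return False
--
--     return True
-- ===== SOURCE B (Python) =====
-- def can_satisfy_remaining(unused, district_adj, remaining_sizes):
--     if not remaining_sizes:
--         return len(unused) == 0
--
--     # Disjoint-set ("quick-find") union instead of BFS: label every unused
--     # district with itself, then merge label classes along each adjacency edge
--     # inside `unused` -- no traversal, no queue, no visited set.
--     comp = {u: u for u in unused}
--     for u in unused:
--         for v in district_adj.get(u, ()):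
--             if v in comp and comp[u] != comp[v]:
--                 old, new = comp[v], comp[u]
--                 comp = {w: (new if c == old else c) for w, c in comp.items()}
--
--     # the label classes partition unused, so their sizes sum to len(unused)
--     if len(unused) != sum(remaining_sizes):
--         return False
--     max_comp = 0
--     for u in unused:
--         size = sum(1 for w in unused if comp[w] == comp[u])
--         if size > max_comp:
--             max_comp = size
--     return max_comp >= max(remaining_sizes)
-- ===== Notes on version B (the rewrite author's own statement) =====
-- stated objective: alternative
-- what changed: Replaces BFS flood-fill (deque, visited set, collected component sets, double descending sort) by a disjoint-set quick-find union: every unused district starts as its own label class, each adjacency edge inside unused merges two classes by relabelling, and the final checks are len(unused) == sum(remaining_sizes) and largest class size >= max(remaining_sizes) -- no graph traversal at all.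
-- intended difference: On empty unused with a nonempty remaining_sizes that sums to 0 but contains a positive entry, A returns True because its largest-component guard is skipped when there are no components, while B returns False, the intended value since no districts cannot fill a positive target size. — e.g. on can_satisfy_remaining([], [], [-1, 1]): A returns true, B returns false
-- outside the precondition, e.g. on can_satisfy_remaining({1, 2}, {2: {1}}, [2]): A returns False, B returns True
import Mathlib
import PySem

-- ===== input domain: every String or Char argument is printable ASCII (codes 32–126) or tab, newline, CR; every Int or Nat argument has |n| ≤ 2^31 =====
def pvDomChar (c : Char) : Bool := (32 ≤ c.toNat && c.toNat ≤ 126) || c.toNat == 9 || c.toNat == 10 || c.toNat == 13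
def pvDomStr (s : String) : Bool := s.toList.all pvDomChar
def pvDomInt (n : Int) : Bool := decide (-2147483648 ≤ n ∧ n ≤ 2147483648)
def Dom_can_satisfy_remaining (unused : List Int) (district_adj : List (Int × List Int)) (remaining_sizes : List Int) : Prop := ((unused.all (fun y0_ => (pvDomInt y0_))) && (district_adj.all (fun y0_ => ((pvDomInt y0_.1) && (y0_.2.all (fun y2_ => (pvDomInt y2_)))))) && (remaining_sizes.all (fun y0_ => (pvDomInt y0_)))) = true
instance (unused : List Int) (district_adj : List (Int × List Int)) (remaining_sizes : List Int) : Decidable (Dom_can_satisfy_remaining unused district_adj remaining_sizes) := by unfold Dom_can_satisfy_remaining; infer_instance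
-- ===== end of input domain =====

-- B replaces A's BFS flood fill (deque, visited set, collected component sets, double
-- descending sort) by a disjoint-set quick-find union: every unused district starts as its
-- own label class, each adjacency edge inside `unused` merges two classes by relabelling,
-- and the final checks compare len(unused) with sum(remaining_sizes) and the largest class
-- size with max(remaining_sizes); objective: alternative (no graph traversal at all).

-- shared helper: `district_adj.get(k, default)` — Python dict lookup with empty default
def adjGet (district_adj : List (Int × List Int)) (c : Int) : List Int :=
  ((PySem.Dict.ofList district_adj).get? c).getD []

-- helper facts for the termination measure of A's BFS loop
theorem pvLenFilterLt {l : List Int} {p : Int → Bool} {n : Int}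
    (h : n ∈ l) (hn : ¬ p n = true) : (l.filter p).length < l.length := by
  have hle := List.length_filter_le p l
  rcases Nat.lt_or_ge (l.filter p).length l.length with h1 | h2
  · exact h1
  · exfalso
    have heq : (l.filter p).length = l.length := le_antisymm hle h2
    have := (List.filter_eq_self (l := l) (p := p)).mp
      (List.Sublist.eq_of_length (List.filter_sublist (l := l) (p := p)) heq)
    exact hn (this n h)

theorem pvFilterGrow (unused v : List Int) (n : Int) (h1 : n ∈ unused) (h2 : n ∉ v) :
    (unused.filter (fun x => !decide (x ∈ v ++ [n]))).length + 1
      ≤ (unused.filter (fun x => !decide (x ∈ v))).length := by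
  have hf : unused.filter (fun x => !decide (x ∈ v ++ [n]))
      = (unused.filter (fun x => !decide (x ∈ v))).filter (fun x => !decide (x = n)) := by
    rw [List.filter_filter]
    apply List.filter_congr
    intro x _
    by_cases h1x : x ∈ v <;> by_cases h2x : x = n <;> simp [h1x, h2x]
  rw [hf]
  have hmem : n ∈ unused.filter (fun x => !decide (x ∈ v)) := by
    rw [List.mem_filter]
    exact ⟨h1, by simpa using h2⟩
  have := pvLenFilterLt (p := fun x => !decide (x = n)) hmem (by simp)
  omega

-- ===== PORT A =====
-- inner `for neighbor in district_adj.get(current, set())` loop of A's BFS;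
-- state = (visited, component, queue)
def bfsStep (unused ns : List Int)
    (st : PySem.Set Int × PySem.Set Int × List Int) : PySem.Set Int × PySem.Set Int × List Int :=
  ns.foldl (fun st n =>
    if n ∈ unused ∧ n ∉ st.1 then
      (PySem.Set.add st.1 n, PySem.Set.add st.2.1 n, st.2.2 ++ [n])
    else st) st

-- the new-unvisited count plus worklist length drops by at least one per processed node
theorem bfsStep_measure (unused ns : List Int) (st : PySem.Set Int × PySem.Set Int × List Int) :
    (unused.filter (fun x => !decide (x ∈ (bfsStep unused ns st).1))).length
      + (bfsStep unused ns st).2.2.length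
      ≤ (unused.filter (fun x => !decide (x ∈ st.1))).length + st.2.2.length := by
  induction ns generalizing st with
  | nil => exact le_rfl
  | cons n ns ih =>
    by_cases hc : n ∈ unused ∧ n ∉ st.1
    · have hexp : bfsStep unused (n :: ns) st
          = bfsStep unused ns (st.1 ++ [n], PySem.Set.add st.2.1 n, st.2.2 ++ [n]) := by
        simp [bfsStep, hc]
      rw [hexp]
      have step := ih (st := (st.1 ++ [n], PySem.Set.add st.2.1 n, st.2.2 ++ [n]))
      dsimp only at step
      have grow := pvFilterGrow unused st.1 n hc.1 hc.2
      simp only [List.length_append, List.length_singleton] at step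
      omega
    · have hexp : bfsStep unused (n :: ns) st = bfsStep unused ns st := by
        simp [bfsStep, hc]
      rw [hexp]; exact ih (st := st)

-- the measure drops across one processed queue node (cited by bfsLoop's decreasing_by)
theorem bfsLoop_dec (unused : List Int) (district_adj : List (Int × List Int))
    (visited component : PySem.Set Int) (current : Int) (rest : List Int) :
    (unused.filter (fun x =>
        !decide (x ∈ (bfsStep unused (adjGet district_adj current) (visited, component, rest)).1))).length
      + (bfsStep unused (adjGet district_adj current) (visited, component, rest)).2.2.length
      < (unused.filter (fun x => !decide (x ∈ visited))).length + (current :: rest).length := by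
  have h := bfsStep_measure unused (adjGet district_adj current) (visited, component, rest)
  dsimp only at h
  simp only [List.length_cons]
  omega

-- A's `while queue:` loop (deque: popleft from the front, append at the back)
def bfsLoop (unused : List Int) (district_adj : List (Int × List Int))
    (visited component : PySem.Set Int) (queue : List Int) :
    PySem.Set Int × PySem.Set Int :=
  match queue with
  | [] => (visited, component)
  | current :: rest =>
    let st := bfsStep unused (adjGet district_adj current) (visited, component, rest)
    bfsLoop unused district_adj st.1 st.2.1 st.2.2
termination_by (unused.filter (fun x => !decide (x ∈ visited))).length + queue.length
decreasing_by
  exact bfsLoop_dec unused district_adj visited component current rest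

def can_satisfy_remaining (unused : List Int) (district_adj : List (Int × List Int)) (remaining_sizes : List Int) : Bool :=
  if remaining_sizes = [] then decide (unused.length = 0)
  else
    let st := unused.foldl (fun (st : List (PySem.Set Int) × PySem.Set Int) start =>
      if start ∈ st.2 then st
      else
        let r := bfsLoop unused district_adj (PySem.Set.add st.2 start) [start] [start]
        (st.1 ++ [r.2], r.1)) ([], [])
    let component_sizes := PySem.List.sorted (st.1.map (fun c => (c.length : Int))) (fun x => x) true
    let required_sizes := PySem.List.sorted remaining_sizes (fun x => x) true
    if component_sizes.sum ≠ required_sizes.sum then false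
    else
      if component_sizes ≠ [] ∧ required_sizes ≠ [] then
        if component_sizes.headI < required_sizes.headI then false else true
      else true

-- ===== PORT B =====
-- `comp = {w: (new if c == old else c) for w, c in comp.items()}` — relabel one class
def relabel (d : PySem.Dict Int Int) (old new : Int) : PySem.Dict Int Int :=
  PySem.Dict.mk (d.items.map (fun wc => (wc.1, if wc.2 = old then new else wc.2)))

-- `if v in comp and comp[u] != comp[v]: old, new = comp[v], comp[u]; relabel`
-- (`comp[u]` is ported with getD 0: u is always a key of comp, see the invariants below)
def mergeEdge (comp : PySem.Dict Int Int) (u v : Int) : PySem.Dict Int Int :=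
  match comp.get? v with
  | none => comp
  | some cv =>
    let cu := (comp.get? u).getD 0
    if cu ≠ cv then relabel comp cv cu else comp

def can_satisfy_remaining_alt (unused : List Int) (district_adj : List (Int × List Int)) (remaining_sizes : List Int) : Bool :=
  if remaining_sizes = [] then decide (unused.length = 0)
  else
    let comp := unused.foldl (fun c u =>
        (adjGet district_adj u).foldl (fun c v => mergeEdge c u v) c)
      (unused.foldl (fun d u => d.insert u u) PySem.Dict.empty)
    if (unused.length : Int) ≠ remaining_sizes.sum then false
    else
      -- `sum(1 for w in unused if comp[w] == comp[u])` is a 0/1 sum, i.e. countP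
      let max_comp := unused.foldl (fun m u =>
        let size : Int := (unused.countP (fun w => comp.get? w == comp.get? u) : Int)
        if m < size then size else m) 0
      decide ((PySem.List.max? remaining_sizes (fun x => x)).getD 0 ≤ max_comp)

-- ===== PRECONDITION & SPEC =====
-- Pre_ excludes (a) lists `unused` with duplicates, which represent no Python set (`unused`
-- is a set), and (b) adjacency that is asymmetric between members of `unused`, on which A's
-- directed BFS from set-iteration-order starts has accidental, order-dependent components —
-- an artefact no one would specify; B's undirected union does the natural thing there.
def Pre_can_satisfy_remaining (unused : List Int) (district_adj : List (Int × List Int)) (remaining_sizes : List Int) : Prop :=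
  unused.Nodup ∧
    ∀ u ∈ unused, ∀ v ∈ adjGet district_adj u, v ∈ unused → u ∈ adjGet district_adj v
instance (unused : List Int) (district_adj : List (Int × List Int)) (remaining_sizes : List Int) : Decidable (Pre_can_satisfy_remaining unused district_adj remaining_sizes) := by unfold Pre_can_satisfy_remaining; infer_instance
def pvWitness_can_satisfy_remaining : List Int × (List (Int × List Int)) × List Int :=
  ([1, 2, 5], [(1, [2]), (2, [1, 3]), (3, [2])], [2, 1])

-- On empty `unused` with a nonempty `remaining_sizes` that sums to 0 but contains a positive
-- entry, A returns True (its largest-component guard is skipped when there are no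
-- components) while B returns False, the intended value: no districts cannot fill a
-- positive target size.
def D_can_satisfy_remaining (unused : List Int) (district_adj : List (Int × List Int)) (remaining_sizes : List Int) : Prop :=
  unused = [] ∧ remaining_sizes.sum = 0 ∧ ∃ x ∈ remaining_sizes, 0 < x
instance (unused : List Int) (district_adj : List (Int × List Int)) (remaining_sizes : List Int) : Decidable (D_can_satisfy_remaining unused district_adj remaining_sizes) := by unfold D_can_satisfy_remaining; infer_instance

def Spec_can_satisfy_remaining (unused : List Int) (district_adj : List (Int × List Int)) (remaining_sizes : List Int) (out : Bool) : Prop := ¬ D_can_satisfy_remaining unused district_adj remaining_sizes → out = can_satisfy_remaining_alt unused district_adj remaining_sizes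
instance (unused : List Int) (district_adj : List (Int × List Int)) (remaining_sizes : List Int) (out : Bool) : Decidable (Spec_can_satisfy_remaining unused district_adj remaining_sizes out) := by unfold Spec_can_satisfy_remaining; infer_instance

def pvDiffWitness_can_satisfy_remaining : List Int × (List (Int × List Int)) × List Int :=
  ([], [], [-1, 1])
def pvDiffWitnessOut_can_satisfy_remaining : Bool × Bool := (true, false)

-- ===== CLAIM (what is proved, stated in full; the proofs are below) =====
def Claim_unchanged_can_satisfy_remaining : Prop := ∀ (unused : List Int) (district_adj : List (Int × List Int)) (remaining_sizes : List Int), Dom_can_satisfy_remaining unused district_adj remaining_sizes → Pre_can_satisfy_remaining unused district_adj remaining_sizes → Spec_can_satisfy_remaining unused district_adj remaining_sizes (can_satisfy_remaining unused district_adj remaining_sizes)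
def Claim_changed_can_satisfy_remaining : Prop := Dom_can_satisfy_remaining (pvDiffWitness_can_satisfy_remaining.1) (pvDiffWitness_can_satisfy_remaining.2.1) (pvDiffWitness_can_satisfy_remaining.2.2) ∧ Pre_can_satisfy_remaining (pvDiffWitness_can_satisfy_remaining.1) (pvDiffWitness_can_satisfy_remaining.2.1) (pvDiffWitness_can_satisfy_remaining.2.2) ∧ D_can_satisfy_remaining (pvDiffWitness_can_satisfy_remaining.1) (pvDiffWitness_can_satisfy_remaining.2.1) (pvDiffWitness_can_satisfy_remaining.2.2) ∧ can_satisfy_remaining (pvDiffWitness_can_satisfy_remaining.1) (pvDiffWitness_can_satisfy_remaining.2.1) (pvDiffWitness_can_satisfy_remaining.2.2) = pvDiffWitnessOut_can_satisfy_remaining.1 ∧ can_satisfy_remaining_alt (pvDiffWitness_can_satisfy_remaining.1) (pvDiffWitness_can_satisfy_remaining.2.1) (pvDiffWitness_can_satisfy_remaining.2.2) = pvDiffWitnessOut_can_satisfy_remaining.2 ∧ pvDiffWitnessOut_can_satisfy_remaining.1 ≠ pvDiffWitnessOut_can_satisfy_remaining.2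
def Claim_exact_can_satisfy_remaining : Prop := ∀ (unused : List Int) (district_adj : List (Int × List Int)) (remaining_sizes : List Int), Dom_can_satisfy_remaining unused district_adj remaining_sizes → Pre_can_satisfy_remaining unused district_adj remaining_sizes → D_can_satisfy_remaining unused district_adj remaining_sizes → can_satisfy_remaining unused district_adj remaining_sizes ≠ can_satisfy_remaining_alt unused district_adj remaining_sizes

-- ===== LEMMAS AND PROOFS =====

-- nodes reachable from `roots` by edges `g` staying inside `U`, every step landing
-- outside `V` (the BFS loop's starting visited set; V = [] is plain connectivity)
inductive Reach (g : Int → List Int) (U V roots : List Int) : Int → Prop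
  | root (x : Int) : x ∈ roots → Reach g U V roots x
  | step (c n : Int) : Reach g U V roots c → n ∈ g c → n ∈ U → n ∉ V → Reach g U V roots n

theorem reach_mono (g : Int → List Int) (U V₁ V₂ roots₁ roots₂ : List Int)
    (hroot : ∀ x ∈ roots₁, Reach g U V₂ roots₂ x) (hV : ∀ x, x ∈ V₂ → x ∈ V₁) :
    ∀ x, Reach g U V₁ roots₁ x → Reach g U V₂ roots₂ x := by
  intro x h
  induction h with
  | root y hy => exact hroot y hy
  | step c n _ hg hu hv ih => exact Reach.step c n ih hg hu (fun hx => hv (hV n hx))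

theorem reach_nil (g : Int → List Int) (U V : List Int) (x : Int) :
    ¬ Reach g U V [] x := by
  intro h
  induction h with
  | root y hy => cases hy
  | step c n _ _ _ _ ih => exact ih

theorem reach_root_or (g : Int → List Int) (U V roots : List Int)
    (x : Int) (h : Reach g U V roots x) : x ∈ roots ∨ x ∉ V := by
  induction h with
  | root y hy => exact Or.inl hy
  | step c n _ _ _ hv => exact Or.inr hv

-- one processed worklist node: how visited/reach change
theorem reach_unfold (g : Int → List Int) (U visited new : List Int) (current : Int)
    (rest roots' : List Int) (hcur : current ∈ visited)
    (hnew : ∀ x, x ∈ new ↔ x ∈ g current ∧ x ∈ U ∧ x ∉ visited)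
    (hroots' : ∀ x, x ∈ roots' ↔ x ∈ rest ∨ x ∈ new) :
    ∀ x, (x ∈ visited ∨ Reach g U visited (current :: rest) x)
        ↔ (x ∈ visited ++ new ∨ Reach g U (visited ++ new) roots' x) := by
  intro x
  constructor
  · rintro (hx | hx)
    · exact Or.inl (List.mem_append_left _ hx)
    · induction hx with
      | root y hy =>
        rcases List.mem_cons.mp hy with rfl | hy
        · exact Or.inl (List.mem_append_left _ hcur)
        · exact Or.inr (Reach.root y ((hroots' y).mpr (Or.inl hy)))
      | step c n hreach hg hu hv ih =>
        by_cases hn : n ∈ new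
        · exact Or.inr (Reach.root n ((hroots' n).mpr (Or.inr hn)))
        · have hnv' : n ∉ visited ++ new := by
            intro hmem
            rcases List.mem_append.mp hmem with h | h
            · exact hv h
            · exact hn h
          rcases ih with hcV | hcR
          · rcases List.mem_append.mp hcV with hcvis | hcnew
            · rcases reach_root_or _ _ _ _ _ hreach with hroot | hnvc
              · rcases List.mem_cons.mp hroot with rfl | hcrest
                · exact absurd ((hnew n).mpr ⟨hg, hu, hv⟩) hn
                · exact Or.inr (Reach.step c n
                    (Reach.root c ((hroots' c).mpr (Or.inl hcrest))) hg hu hnv')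
              · exact absurd hcvis hnvc
            · exact Or.inr (Reach.step c n
                (Reach.root c ((hroots' c).mpr (Or.inr hcnew))) hg hu hnv')
          · exact Or.inr (Reach.step c n hcR hg hu hnv')
  · rintro (hx | hx)
    · rcases List.mem_append.mp hx with h | h
      · exact Or.inl h
      · obtain ⟨h1, h2, h3⟩ := (hnew x).mp h
        exact Or.inr (Reach.step current x
          (Reach.root current (List.mem_cons_self ..)) h1 h2 h3)
    · refine Or.inr (reach_mono g U (visited ++ new) visited roots' (current :: rest) ?_ ?_ x hx)
      · intro y hy
        rcases (hroots' y).mp hy with h | h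
        · exact Reach.root y (List.mem_cons_of_mem _ h)
        · obtain ⟨h1, h2, h3⟩ := (hnew y).mp h
          exact Reach.step current y
            (Reach.root current (List.mem_cons_self ..)) h1 h2 h3
      · intro y hy
        exact List.mem_append_left _ hy

theorem bfsStep_spec (unused ns : List Int) (v c : PySem.Set Int) (q : List Int)
    (hcv : ∀ x ∈ c, x ∈ v) :
    ∃ new, bfsStep unused ns (v, c, q) = (v ++ new, c ++ new, q ++ new) ∧
      new.Nodup ∧ (∀ x, x ∈ new ↔ x ∈ ns ∧ x ∈ unused ∧ x ∉ v) := by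
  induction ns generalizing v c q with
  | nil =>
    exact ⟨[], by simp [bfsStep], List.nodup_nil, by simp⟩
  | cons n ns ih =>
    by_cases hc : n ∈ unused ∧ n ∉ v
    · have hnc : n ∉ c := fun h => hc.2 (hcv n h)
      have hexp : bfsStep unused (n :: ns) (v, c, q)
          = bfsStep unused ns (v ++ [n], c ++ [n], q ++ [n]) := by
        simp [bfsStep, hc, PySem.Set.add_of_not_mem hnc]
      obtain ⟨new', heq, hnodup, hmem⟩ := ih (v := v ++ [n]) (c := c ++ [n]) (q := q ++ [n])
        (by intro x hx; rcases List.mem_append.mp hx with h | h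
            · exact List.mem_append_left _ (hcv x h)
            · exact List.mem_append_right _ h)
      refine ⟨n :: new', ?_, ?_, ?_⟩
      · rw [hexp, heq]
        simp [List.append_assoc]
      · refine List.nodup_cons.mpr ⟨?_, hnodup⟩
        intro h
        exact ((hmem n).mp h).2.2 (List.mem_append_right _ (List.mem_singleton.mpr rfl))
      · intro x
        rw [List.mem_cons, hmem x]
        constructor
        · rintro (rfl | ⟨h1, h2, h3⟩)
          · exact ⟨List.mem_cons_self .., hc.1, hc.2⟩
          · exact ⟨List.mem_cons_of_mem _ h1, h2,
              fun hxv => h3 (List.mem_append_left _ hxv)⟩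
        · rintro ⟨h1, h2, h3⟩
          by_cases hxn : x = n
          · exact Or.inl hxn
          · rcases List.mem_cons.mp h1 with h1' | h1'
            · exact absurd h1' hxn
            · refine Or.inr ⟨h1', h2, ?_⟩
              intro hx
              rcases List.mem_append.mp hx with h | h
              · exact h3 h
              · exact hxn (List.mem_singleton.mp h)
    · have hexp : bfsStep unused (n :: ns) (v, c, q) = bfsStep unused ns (v, c, q) := by
        simp [bfsStep, hc]
      obtain ⟨new, heq, hnodup, hmem⟩ := ih (v := v) (c := c) (q := q) hcv
      refine ⟨new, by rw [hexp, heq], hnodup, ?_⟩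
      intro x
      rw [hmem x]
      constructor
      · rintro ⟨h1, h2, h3⟩
        exact ⟨List.mem_cons_of_mem _ h1, h2, h3⟩
      · rintro ⟨h1, h2, h3⟩
        rcases List.mem_cons.mp h1 with rfl | h1
        · exact absurd ⟨h2, h3⟩ hc
        · exact ⟨h1, h2, h3⟩

theorem bfsLoop_spec (unused : List Int) (district_adj : List (Int × List Int)) :
    ∀ (visited component : PySem.Set Int) (queue : List Int),
      (∀ x ∈ queue, x ∈ visited) → (∀ x ∈ component, x ∈ visited) → visited.Nodup →
      ∃ added,
        bfsLoop unused district_adj visited component queue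
            = (visited ++ added, component ++ added) ∧
        (visited ++ added).Nodup ∧ (∀ x ∈ added, x ∈ unused) ∧
        (∀ x, x ∈ visited ++ added
            ↔ x ∈ visited ∨ Reach (adjGet district_adj) unused visited queue x) := by
  intro visited component queue
  induction visited, component, queue using bfsLoop.induct unused district_adj with
  | case1 visited component =>
    intro _ _ hnd
    refine ⟨[], by simp [bfsLoop], by simpa using hnd, by simp, ?_⟩
    intro x
    simp only [List.append_nil]
    exact ⟨Or.inl, fun h => h.resolve_right (reach_nil _ _ _ x)⟩
  | case2 visited component current rest st ih =>
    intro hqv hcv hnd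
    obtain ⟨new, hst, hndnew, hmemnew⟩ :=
      bfsStep_spec unused (adjGet district_adj current) visited component rest hcv
    have hndvn : (visited ++ new).Nodup := by
      rw [List.nodup_append]
      refine ⟨hnd, hndnew, ?_⟩
      intro a ha b hb h
      exact ((hmemnew b).mp hb).2.2 (h ▸ ha)
    simp only [st, hst] at ih
    obtain ⟨added', heq', hnd', hun', hmem'⟩ := ih
      (by intro x hx
          rcases List.mem_append.mp hx with h | h
          · exact List.mem_append_left _ (hqv x (List.mem_cons_of_mem _ h))
          · exact List.mem_append_right _ h)
      (by intro x hx
          rcases List.mem_append.mp hx with h | h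
          · exact List.mem_append_left _ (hcv x h)
          · exact List.mem_append_right _ h)
      hndvn
    refine ⟨new ++ added', ?_, ?_, ?_, ?_⟩
    · rw [bfsLoop, hst]
      dsimp only
      rw [heq']
      simp [List.append_assoc]
    · simpa [List.append_assoc] using hnd'
    · intro x hx
      rcases List.mem_append.mp hx with h | h
      · exact ((hmemnew x).mp h).2.1
      · exact hun' x h
    · intro x
      have h1 : x ∈ visited ++ (new ++ added') ↔ x ∈ (visited ++ new) ++ added' := by
        rw [List.append_assoc]
      rw [h1, hmem' x]
      exact (reach_unfold (adjGet district_adj) unused visited new current rest (rest ++ new)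
        (hqv current (List.mem_cons_self ..)) (fun y => hmemnew y)
        (fun y => List.mem_append) x).symm

-- ---------- plain-connectivity lemmas (V = []) ----------

theorem reach_trans (g : Int → List Int) (U : List Int) (s x y : Int)
    (h1 : Reach g U [] [s] x) (h2 : Reach g U [] [x] y) : Reach g U [] [s] y := by
  induction h2 with
  | root z hz => rwa [List.mem_singleton.mp hz]
  | step c n _ hg hu hv ih => exact Reach.step c n ih hg hu hv

theorem reach_symm (g : Int → List Int) (U : List Int)
    (hp : ∀ u ∈ U, ∀ v ∈ g u, v ∈ U → u ∈ g v) (s : Int) (hs : s ∈ U) :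
    ∀ x, Reach g U [] [s] x → x ∈ U ∧ Reach g U [] [x] s := by
  intro x h
  induction h with
  | root y hy =>
    rw [List.mem_singleton.mp hy]
    exact ⟨hs, Reach.root s (List.mem_singleton.mpr rfl)⟩
  | step c n hr hg hu _ ih =>
    refine ⟨hu, ?_⟩
    have hcg : c ∈ g n := hp c ih.1 n hg hu
    exact reach_trans g U n c s
      (Reach.step n c (Reach.root n (List.mem_singleton.mpr rfl)) hcg ih.1 (by simp)) ih.2

-- `V` closed under edges inside `U`
def ClosedU (g : Int → List Int) (U V : List Int) : Prop :=
  ∀ a ∈ V, ∀ b ∈ g a, b ∈ U → b ∈ V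

theorem reach_closed (g : Int → List Int) (U V : List Int) (hcl : ClosedU g U V)
    (s : Int) (hs : s ∈ V) : ∀ x, Reach g U [] [s] x → x ∈ V := by
  intro x h
  induction h with
  | root y hy => rwa [List.mem_singleton.mp hy]
  | step c n _ hg hu _ ih => exact hcl c ih n hg hu

theorem reach_avoid (g : Int → List Int) (U visited : List Int) (hcl : ClosedU g U visited)
    (s : Int) : ∀ x, Reach g U [] [s] x →
      x ∈ visited ++ [s] ∨ Reach g U (visited ++ [s]) [s] x := by
  intro x h
  induction h with
  | root y hy =>
    rw [List.mem_singleton.mp hy]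
    exact Or.inl (List.mem_append_right _ (List.mem_singleton.mpr rfl))
  | step c n hr hg hu _ ih =>
    by_cases hn : n ∈ visited ++ [s]
    · exact Or.inl hn
    · rcases ih with hcV | hcR
      · rcases List.mem_append.mp hcV with hcvis | hcs
        · exact absurd (List.mem_append_left _ (hcl c hcvis n hg hu)) hn
        · obtain rfl := List.mem_singleton.mp hcs
          exact Or.inr (Reach.step _ n (Reach.root _ (List.mem_singleton.mpr rfl)) hg hu hn)
      · exact Or.inr (Reach.step c n hcR hg hu hn)

-- ---------- A-side outer loop: the collected components are the connectivity classes ----------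

theorem outerA (unused : List Int) (district_adj : List (Int × List Int))
    (hp : ∀ u ∈ unused, ∀ v ∈ adjGet district_adj u, v ∈ unused → u ∈ adjGet district_adj v) :
    ∀ (us : List Int) (comps : List (PySem.Set Int)) (visited : PySem.Set Int),
      (∀ x ∈ us, x ∈ unused) →
      visited.Nodup →
      (∀ x ∈ visited, x ∈ unused) →
      ClosedU (adjGet district_adj) unused visited →
      (∀ C ∈ comps, C ≠ [] ∧ C.Nodup ∧ (∀ x ∈ C, x ∈ visited) ∧
        (∀ x ∈ C, ∀ y, y ∈ C ↔ y ∈ unused ∧ Reach (adjGet district_adj) unused [] [x] y)) →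
      (∀ x ∈ visited, ∃ C ∈ comps, x ∈ C) →
      ((comps.map (fun c => (c.length : Int))).sum = (visited.length : Int)) →
      (letI r := us.foldl (fun (st : List (PySem.Set Int) × PySem.Set Int) start =>
          if start ∈ st.2 then st
          else
            (st.1 ++ [(bfsLoop unused district_adj (PySem.Set.add st.2 start) [start] [start]).2],
              (bfsLoop unused district_adj (PySem.Set.add st.2 start) [start] [start]).1)) (comps, visited)
       r.2.Nodup ∧ (∀ x ∈ r.2, x ∈ unused) ∧
       (∀ C ∈ r.1, C ≠ [] ∧ C.Nodup ∧ (∀ x ∈ C, x ∈ r.2) ∧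
         (∀ x ∈ C, ∀ y, y ∈ C ↔ y ∈ unused ∧ Reach (adjGet district_adj) unused [] [x] y)) ∧
       (∀ x ∈ r.2, ∃ C ∈ r.1, x ∈ C) ∧
       ((r.1.map (fun c => (c.length : Int))).sum = (r.2.length : Int)) ∧
       (∀ x ∈ us, x ∈ r.2) ∧ (∀ x ∈ visited, x ∈ r.2)) := by
  intro us
  induction us with
  | nil =>
    intro comps visited _ hnd hvu hcl hC hcov hsum
    exact ⟨hnd, hvu, hC, hcov, hsum, by simp, fun x hx => hx⟩
  | cons start us ih =>
    intro comps visited hus hnd hvu hcl hC hcov hsum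
    simp only [List.foldl_cons]
    by_cases hsk : start ∈ visited
    · rw [if_pos hsk]
      obtain ⟨a1, a2, a3, a4, a5, a6, a7⟩ :=
        ih comps visited (fun x hx => hus x (List.mem_cons_of_mem _ hx)) hnd hvu hcl hC hcov hsum
      refine ⟨a1, a2, a3, a4, a5, ?_, a7⟩
      intro x hx
      rcases List.mem_cons.mp hx with rfl | hx
      · exact a7 x hsk
      · exact a6 x hx
    · rw [if_neg hsk]
      have hstartU : start ∈ unused := hus start (List.mem_cons_self ..)
      have hndV : (visited ++ [start]).Nodup := by
        rw [List.nodup_append]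
        refine ⟨hnd, List.nodup_singleton _, ?_⟩
        intro a ha b hb hab
        exact hsk ((hab.trans (List.mem_singleton.mp hb)) ▸ ha)
      obtain ⟨added, heq, hnd', hun', hmem'⟩ :=
        bfsLoop_spec unused district_adj (PySem.Set.add visited start) [start] [start]
          (by intro x hx
              rw [List.mem_singleton.mp hx, PySem.Set.add_of_not_mem hsk]
              exact List.mem_append_right _ (List.mem_singleton.mpr rfl))
          (by intro x hx
              rw [List.mem_singleton.mp hx, PySem.Set.add_of_not_mem hsk]
              exact List.mem_append_right _ (List.mem_singleton.mpr rfl))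
          (by rw [PySem.Set.add_of_not_mem hsk]; exact hndV)
      rw [PySem.Set.add_of_not_mem hsk] at heq hnd' hmem'
      -- abbreviations
      have hdisj : ∀ y ∈ added, y ∉ visited ++ [start] := by
        intro y hy hyV
        obtain ⟨-, -, hdj⟩ := List.nodup_append.mp hnd'
        exact hdj y hyV y hy rfl
      have hplain : ∀ y, Reach (adjGet district_adj) unused (visited ++ [start]) [start] y →
          Reach (adjGet district_adj) unused [] [start] y := by
        intro y hy
        exact reach_mono _ _ (visited ++ [start]) [] [start] [start]
          (fun z hz => Reach.root z hz) (fun z hz => absurd hz (List.not_mem_nil)) y hy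
      have hSC : ∀ y, y ∈ [start] ++ added
          ↔ y ∈ unused ∧ Reach (adjGet district_adj) unused [] [start] y := by
        intro y
        constructor
        · intro hy
          rcases List.mem_append.mp hy with hys | hya
          · obtain rfl := List.mem_singleton.mp hys
            exact ⟨hstartU, Reach.root _ (List.mem_singleton.mpr rfl)⟩
          · refine ⟨hun' y hya, ?_⟩
            have hyV' : y ∈ (visited ++ [start]) ++ added :=
              List.mem_append_right _ hya
            rcases (hmem' y).mp hyV' with hyV | hyR
            · exact absurd hyV (hdisj y hya)
            · exact hplain y hyR
        · rintro ⟨hyU, hys⟩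
          have hnotvis : y ∉ visited := by
            intro hyv
            obtain ⟨hyU', hback⟩ :=
              reach_symm (adjGet district_adj) unused
                (fun u hu v hv hvU => hp u hu v hv hvU) start hstartU y hys
            exact hsk (reach_closed (adjGet district_adj) unused visited hcl y hyv start hback)
          rcases reach_avoid (adjGet district_adj) unused visited hcl start y hys with hyV | hyR
          · rcases List.mem_append.mp hyV with hyv | hyst
            · exact absurd hyv hnotvis
            · exact List.mem_append_left _ hyst
          · have : y ∈ (visited ++ [start]) ++ added := (hmem' y).mpr (Or.inr hyR)
            rcases List.mem_append.mp this with hyV | hya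
            · rcases List.mem_append.mp hyV with hyv | hyst
              · exact absurd hyv hnotvis
              · exact List.mem_append_left _ hyst
            · exact List.mem_append_right _ hya
      have hchar : ∀ x ∈ [start] ++ added, ∀ y, y ∈ [start] ++ added
          ↔ y ∈ unused ∧ Reach (adjGet district_adj) unused [] [x] y := by
        intro x hx y
        obtain ⟨hxU, hxs⟩ := (hSC x).mp hx
        rw [hSC y]
        constructor
        · rintro ⟨hyU, hys⟩
          exact ⟨hyU, reach_trans _ _ x start y
            ((reach_symm (adjGet district_adj) unused hp start hstartU x hxs).2) hys⟩
        · rintro ⟨hyU, hxy⟩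
          exact ⟨hyU, reach_trans _ _ start x y hxs hxy⟩
      -- the new visited set is closed under edges
      have hcl' : ClosedU (adjGet district_adj) unused ((visited ++ [start]) ++ added) := by
        intro a ha b hbg hbU
        by_cases hbV : b ∈ visited ++ [start]
        · exact (hmem' b).mpr (Or.inl hbV)
        · rcases (hmem' a).mp ha with haV | haR
          · rcases List.mem_append.mp haV with hav | has
            · exact (hmem' b).mpr (Or.inl (List.mem_append_left _ (hcl a hav b hbg hbU)))
            · obtain rfl := List.mem_singleton.mp has
              exact (hmem' b).mpr (Or.inr (Reach.step _ b
                (Reach.root _ (List.mem_singleton.mpr rfl)) hbg hbU hbV))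
          · exact (hmem' b).mpr (Or.inr (Reach.step a b haR hbg hbU hbV))
      have hvu' : ∀ x ∈ (visited ++ [start]) ++ added, x ∈ unused := by
        intro x hx
        rcases List.mem_append.mp hx with hV | ha
        · rcases List.mem_append.mp hV with hv | hs
          · exact hvu x hv
          · exact (List.mem_singleton.mp hs) ▸ hstartU
        · exact hun' x ha
      have hCnd : ([start] ++ added).Nodup := by
        have : (visited ++ ([start] ++ added)).Nodup := by
          rwa [← List.append_assoc]
        exact (List.nodup_append.mp this).2.1
      obtain ⟨a1, a2, a3, a4, a5, a6, a7⟩ :=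
        ih (comps ++ [[start] ++ added]) ((visited ++ [start]) ++ added)
          (fun x hx => hus x (List.mem_cons_of_mem _ hx))
          hnd' hvu' hcl'
          (by intro C hc
              rcases List.mem_append.mp hc with hcold | hcnew
              · obtain ⟨hC1, hC2, hC3, hC4⟩ := hC C hcold
                exact ⟨hC1, hC2,
                  fun x hx => List.mem_append_left _ (List.mem_append_left _ (hC3 x hx)), hC4⟩
              · obtain rfl := List.mem_singleton.mp hcnew
                refine ⟨by simp, hCnd, ?_, hchar⟩
                intro x hx
                rcases List.mem_append.mp hx with hs | ha
                · exact List.mem_append_left _ (List.mem_append_right _ hs)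
                · exact List.mem_append_right _ ha)
          (by intro x hx
              rcases List.mem_append.mp hx with hV | ha
              · rcases List.mem_append.mp hV with hv | hs
                · obtain ⟨C, hc, hxc⟩ := hcov x hv
                  exact ⟨C, List.mem_append_left _ hc, hxc⟩
                · exact ⟨[start] ++ added,
                    List.mem_append_right _ (List.mem_singleton.mpr rfl),
                    List.mem_append_left _ hs⟩
              · exact ⟨[start] ++ added,
                  List.mem_append_right _ (List.mem_singleton.mpr rfl),
                  List.mem_append_right _ ha⟩)
          (by simp only [List.map_append, List.sum_append, List.map_singleton,
                List.sum_singleton, hsum, List.length_append, List.length_singleton]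
              push_cast
              ring)
      have hre : bfsLoop unused district_adj (PySem.Set.add visited start) [start] [start]
          = ((visited ++ [start]) ++ added, [start] ++ added) := by
        rw [PySem.Set.add_of_not_mem hsk]; exact heq
      rw [hre]
      refine ⟨a1, a2, a3, a4, a5, ?_, ?_⟩
      · intro x hx
        rcases List.mem_cons.mp hx with rfl | hx
        · exact a7 x (List.mem_append_left _ (List.mem_append_right _ (List.mem_singleton.mpr rfl)))
        · exact a6 x hx
      · intro x hx
        exact a7 x (List.mem_append_left _ (List.mem_append_left _ hx))

-- ---------- B-side: quick-find classes are the connectivity classes ----------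

theorem init_get (us : List Int) :
    ∀ (d : PySem.Dict Int Int) (x : Int),
      (us.foldl (fun d u => d.insert u u) d).get? x
        = if x ∈ us then some x else d.get? x := by
  induction us with
  | nil => intro d x; simp
  | cons u us ih =>
    intro d x
    simp only [List.foldl_cons]
    rw [ih]
    by_cases hx : x ∈ us
    · simp [hx, List.mem_cons]
    · rw [if_neg hx, PySem.Dict.get?_insert]
      by_cases hxu : x = u
      · simp [hxu]
      · simp [hxu, hx]

theorem relabel_get_aux (old new : Int) :
    ∀ (l : List (Int × Int)) (x : Int),
      (PySem.Dict.mk (l.map (fun wc => (wc.1, if wc.2 = old then new else wc.2)))).get? x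
        = ((PySem.Dict.mk l).get? x).map (fun c => if c = old then new else c) := by
  intro l
  induction l with
  | nil => intro x; rfl
  | cons p t ih =>
    intro x
    obtain ⟨k, v⟩ := p
    simp only [List.map_cons, PySem.Dict.get?_mk_cons]
    by_cases h : k = x
    · simp [h]
    · simp only [beq_iff_eq, if_neg h]
      exact ih x

theorem relabel_get (d : PySem.Dict Int Int) (old new x : Int) :
    (relabel d old new).get? x = (d.get? x).map (fun c => if c = old then new else c) := by
  obtain ⟨l⟩ := d
  exact relabel_get_aux old new l x

-- two keys carrying the same label
def EqV (c : PySem.Dict Int Int) (x y : Int) : Prop :=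
  ∃ v, c.get? x = some v ∧ c.get? y = some v

-- invariants of the union loop
def InvB (unused : List Int) (district_adj : List (Int × List Int))
    (c : PySem.Dict Int Int) : Prop :=
  (∀ x, (c.get? x).isSome = true ↔ x ∈ unused) ∧
  (∀ x y, EqV c x y → Reach (adjGet district_adj) unused [] [x] y)

theorem mergeEdge_spec (unused : List Int) (district_adj : List (Int × List Int))
    (hp : ∀ u ∈ unused, ∀ v ∈ adjGet district_adj u, v ∈ unused → u ∈ adjGet district_adj v)
    (comp : PySem.Dict Int Int) (u v : Int) (hu : u ∈ unused)
    (hvg : v ∈ adjGet district_adj u) (hinv : InvB unused district_adj comp) :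
    InvB unused district_adj (mergeEdge comp u v) ∧
    (∀ x y, EqV comp x y → EqV (mergeEdge comp u v) x y) ∧
    (v ∈ unused → EqV (mergeEdge comp u v) u v) := by
  obtain ⟨K, B1⟩ := hinv
  cases hv : comp.get? v with
  | none =>
    have hme : mergeEdge comp u v = comp := by simp [mergeEdge, hv]
    rw [hme]
    refine ⟨⟨K, B1⟩, fun x y h => h, ?_⟩
    intro hvU
    have := (K v).mpr hvU
    rw [hv] at this
    simp at this
  | some cv =>
    have hvU : v ∈ unused := (K v).mp (by simp [hv])
    obtain ⟨cu, hu'⟩ : ∃ cu, comp.get? u = some cu :=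
      Option.isSome_iff_exists.mp ((K u).mpr hu)
    have huv_reach : Reach (adjGet district_adj) unused [] [u] v :=
      Reach.step u v (Reach.root u (List.mem_singleton.mpr rfl)) hvg hvU (by simp)
    have hvu_reach : Reach (adjGet district_adj) unused [] [v] u :=
      Reach.step v u (Reach.root v (List.mem_singleton.mpr rfl))
        (hp u hu v hvg hvU) hu (by simp)
    by_cases hne : cu = cv
    · have hme : mergeEdge comp u v = comp := by
        simp [mergeEdge, hv, hu', hne]
      rw [hme]
      exact ⟨⟨K, B1⟩, fun x y h => h, fun _ => ⟨cv, by rw [hu', hne], hv⟩⟩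
    · have hme : mergeEdge comp u v = relabel comp cv cu := by
        simp [mergeEdge, hv, hu', hne]
      rw [hme]
      have hget : ∀ x, (relabel comp cv cu).get? x
          = (comp.get? x).map (fun c => if c = cv then cu else c) :=
        fun x => relabel_get comp cv cu x
      have hfcase : ∀ a b : Int,
          (if a = cv then cu else a) = (if b = cv then cu else b) →
          a = b ∨ (a = cv ∧ b = cu) ∨ (a = cu ∧ b = cv) := by
        intro a b hab
        by_cases ha : a = cv
        · by_cases hb : b = cv
          · exact Or.inl (ha.trans hb.symm)
          · rw [if_pos ha, if_neg hb] at hab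
            exact Or.inr (Or.inl ⟨ha, hab.symm⟩)
        · by_cases hb : b = cv
          · rw [if_neg ha, if_pos hb] at hab
            exact Or.inr (Or.inr ⟨hab, hb⟩)
          · rw [if_neg ha, if_neg hb] at hab
            exact Or.inl hab
      refine ⟨⟨?_, ?_⟩, ?_, ?_⟩
      · intro x
        rw [hget, ← K x]
        cases comp.get? x <;> simp
      · rintro x y ⟨w, hxw, hyw⟩
        rw [hget] at hxw hyw
        obtain ⟨a, hxa, hfa⟩ := Option.map_eq_some_iff.mp hxw
        obtain ⟨b, hyb, hfb⟩ := Option.map_eq_some_iff.mp hyw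
        rcases hfcase a b (hfa.trans hfb.symm) with rfl | ⟨rfl, rfl⟩ | ⟨rfl, rfl⟩
        · exact B1 x y ⟨a, hxa, hyb⟩
        · exact reach_trans _ _ x u y
            (reach_trans _ _ x v u (B1 x v ⟨_, hxa, hv⟩) hvu_reach)
            (B1 u y ⟨_, hu', hyb⟩)
        · exact reach_trans _ _ x v y
            (reach_trans _ _ x u v (B1 x u ⟨_, hxa, hu'⟩) huv_reach)
            (B1 v y ⟨_, hv, hyb⟩)
      · rintro x y ⟨w, hxw, hyw⟩
        exact ⟨if w = cv then cu else w, by rw [hget, hxw]; rfl, by rw [hget, hyw]; rfl⟩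
      · intro _
        refine ⟨cu, ?_, ?_⟩
        · rw [hget, hu']
          simp [hne]
        · rw [hget, hv]
          simp

theorem innerB (unused : List Int) (district_adj : List (Int × List Int))
    (hp : ∀ u ∈ unused, ∀ v ∈ adjGet district_adj u, v ∈ unused → u ∈ adjGet district_adj v)
    (u : Int) (hu : u ∈ unused) :
    ∀ (ns : List Int) (comp : PySem.Dict Int Int),
      (∀ v ∈ ns, v ∈ adjGet district_adj u) →
      InvB unused district_adj comp →
      (letI c' := ns.foldl (fun c v => mergeEdge c u v) comp
       InvB unused district_adj c' ∧
       (∀ x y, EqV comp x y → EqV c' x y) ∧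
       (∀ v ∈ ns, v ∈ unused → EqV c' u v)) := by
  intro ns
  induction ns with
  | nil =>
    intro comp _ hinv
    exact ⟨hinv, fun x y h => h, by simp⟩
  | cons v ns ih =>
    intro comp hns hinv
    simp only [List.foldl_cons]
    obtain ⟨hinv1, hmono1, hedge1⟩ :=
      mergeEdge_spec unused district_adj hp comp u v hu (hns v (List.mem_cons_self ..)) hinv
    obtain ⟨hinv', hmono', hedges'⟩ :=
      ih (mergeEdge comp u v) (fun w hw => hns w (List.mem_cons_of_mem _ hw)) hinv1
    refine ⟨hinv', fun x y h => hmono' x y (hmono1 x y h), ?_⟩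
    intro w hw hwU
    rcases List.mem_cons.mp hw with rfl | hw
    · exact hmono' _ _ (hedge1 hwU)
    · exact hedges' w hw hwU

theorem outerB (unused : List Int) (district_adj : List (Int × List Int))
    (hp : ∀ u ∈ unused, ∀ v ∈ adjGet district_adj u, v ∈ unused → u ∈ adjGet district_adj v) :
    ∀ (us : List Int) (comp : PySem.Dict Int Int),
      (∀ x ∈ us, x ∈ unused) →
      InvB unused district_adj comp →
      (letI c' := us.foldl (fun c u =>
          (adjGet district_adj u).foldl (fun c v => mergeEdge c u v) c) comp
       InvB unused district_adj c' ∧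
       (∀ x y, EqV comp x y → EqV c' x y) ∧
       (∀ u ∈ us, ∀ v ∈ adjGet district_adj u, v ∈ unused → EqV c' u v)) := by
  intro us
  induction us with
  | nil =>
    intro comp _ hinv
    exact ⟨hinv, fun x y h => h, by simp⟩
  | cons u us ih =>
    intro comp hus hinv
    simp only [List.foldl_cons]
    obtain ⟨hinv1, hmono1, hedges1⟩ :=
      innerB unused district_adj hp u (hus u (List.mem_cons_self ..))
        (adjGet district_adj u) comp (fun _ hv => hv) hinv
    obtain ⟨hinv', hmono', hedges'⟩ :=
      ih _ (fun w hw => hus w (List.mem_cons_of_mem _ hw)) hinv1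
    refine ⟨hinv', fun x y h => hmono' x y (hmono1 x y h), ?_⟩
    intro w hw v hvg hvU
    rcases List.mem_cons.mp hw with rfl | hw
    · exact hmono' _ _ (hedges1 v hvg hvU)
    · exact hedges' w hw v hvg hvU

theorem reach_to_eqv (unused : List Int) (district_adj : List (Int × List Int))
    (comp : PySem.Dict Int Int) (hinv : InvB unused district_adj comp)
    (hE : ∀ u ∈ unused, ∀ v ∈ adjGet district_adj u, v ∈ unused → EqV comp u v) :
    ∀ x y, x ∈ unused → Reach (adjGet district_adj) unused [] [x] y →
      y ∈ unused ∧ EqV comp x y := by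
  intro x y hx h
  induction h with
  | root z hz =>
    obtain ⟨cx, hcx⟩ : ∃ c, comp.get? x = some c :=
      Option.isSome_iff_exists.mp ((hinv.1 x).mpr hx)
    rw [List.mem_singleton.mp hz]
    exact ⟨hx, cx, hcx, hcx⟩
  | step c n hr hg hu hv ih =>
    obtain ⟨hcU, w, hxw, hcw⟩ := ih
    obtain ⟨w2, hcw2, hnw2⟩ := hE c hcU n hg hu
    rw [hcw] at hcw2
    obtain rfl := Option.some.inj hcw2
    exact ⟨hu, w, hxw, hnw2⟩

-- ---------- the max over class sizes matches the max over component sizes ----------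

theorem foldl_if_max (l : List Int) (f : Int → Int) :
    ∀ m : Int, l.foldl (fun m u => let s := f u; if m < s then s else m) m
      = (l.map f).foldl max m := by
  induction l with
  | nil => intro m; rfl
  | cons a t ih =>
    intro m
    simp only [List.foldl_cons, List.map_cons]
    rw [ih]
    congr 1
    rcases lt_or_ge m (f a) with h | h
    · simp only [if_pos h]
      exact (max_eq_right (le_of_lt h)).symm
    · simp only [if_neg (not_lt.mpr h)]
      exact (max_eq_left h).symm

theorem foldl_max_eq (l1 l2 : List Int) (h12 : ∀ a ∈ l1, a ∈ l2) (h21 : ∀ b ∈ l2, b ∈ l1) :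
    l1.foldl max 0 = l2.foldl max 0 := by
  have h1 := PySem.List.foldl_max_mem l1 (0 : Int)
  have h2 := PySem.List.foldl_max_mem l2 (0 : Int)
  have hle1 := PySem.List.le_foldl_max l1 (0 : Int)
  have hle2 := PySem.List.le_foldl_max l2 (0 : Int)
  apply le_antisymm
  · rcases h1 with h | h
    · rw [h]; exact hle2.1
    · exact hle2.2 _ (h12 _ h)
  · rcases h2 with h | h
    · rw [h]; exact hle1.1
    · exact hle1.2 _ (h21 _ h)

-- ---------- final arithmetic: A's sort-based checks equal B's checks ----------

theorem final_lemma (unused remaining_sizes : List Int)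
    (comps : List (PySem.Set Int)) (vf : PySem.Set Int) (mc : Int)
    (hrem : remaining_sizes ≠ []) (hnd : unused.Nodup)
    (a2 : vf.Nodup) (a3 : ∀ x ∈ vf, x ∈ unused) (a4 : ∀ x ∈ unused, x ∈ vf)
    (a6 : ((comps.map (fun c => (c.length : Int))).sum = (vf.length : Int)))
    (a7 : mc = (comps.map (fun c => (c.length : Int))).foldl (fun m s => max m s) 0)
    (a8 : ∀ c ∈ comps, 1 ≤ c.length)
    (a9 : comps = [] ↔ vf = [])
    (hD : ¬ (unused = [] ∧ remaining_sizes.sum = 0 ∧ ∃ x ∈ remaining_sizes, 0 < x)) :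
    (if (PySem.List.sorted (comps.map (fun c => (c.length : Int))) (fun x => x) true).sum
        ≠ (PySem.List.sorted remaining_sizes (fun x => x) true).sum then false
     else
      if (PySem.List.sorted (comps.map (fun c => (c.length : Int))) (fun x => x) true) ≠ [] ∧
          (PySem.List.sorted remaining_sizes (fun x => x) true) ≠ [] then
        if (PySem.List.sorted (comps.map (fun c => (c.length : Int))) (fun x => x) true).headI
            < (PySem.List.sorted remaining_sizes (fun x => x) true).headI then false else true
      else true)
    = (if (unused.length : Int) ≠ remaining_sizes.sum then false
       else decide ((PySem.List.max? remaining_sizes (fun x => x)).getD 0 ≤ mc)) := by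
  have hlen : vf.length = unused.length :=
    ((List.perm_ext_iff_of_nodup a2 hnd).mpr (fun x => ⟨a3 x, a4 x⟩)).length_eq
  have hsum1 : (PySem.List.sorted (comps.map (fun c => (c.length : Int))) (fun x => x) true).sum
      = (comps.map (fun c => (c.length : Int))).sum :=
    (PySem.List.sorted_perm ..).sum_eq
  have hsum2 : (PySem.List.sorted remaining_sizes (fun x => x) true).sum
      = remaining_sizes.sum := (PySem.List.sorted_perm ..).sum_eq
  have hcseq : (comps.map (fun c => (c.length : Int))).sum = (unused.length : Int) := by
    rw [a6]
    exact_mod_cast congrArg Nat.cast hlen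
  by_cases hB : (unused.length : Int) ≠ remaining_sizes.sum
  · rw [if_pos (by rw [hsum1, hsum2, hcseq]; exact hB), if_pos hB]
  · rw [if_neg (by rw [hsum1, hsum2, hcseq]; exact hB), if_neg hB]
    rw [ne_eq, not_not] at hB
    obtain ⟨r0, rt, hrs⟩ : ∃ r0 rt,
        PySem.List.sorted remaining_sizes (fun x => x) true = r0 :: rt := by
      cases h : PySem.List.sorted remaining_sizes (fun x => x) true with
      | nil => exact absurd ((PySem.List.sorted_eq_nil_iff ..).mp h) hrem
      | cons a t => exact ⟨a, t, rfl⟩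
    obtain ⟨m, hm⟩ : ∃ m, PySem.List.max? remaining_sizes (fun x => x) = some m := by
      cases h : PySem.List.max? remaining_sizes (fun x => x) with
      | none => exact absurd ((PySem.List.max?_eq_none_iff ..).mp h) hrem
      | some m => exact ⟨m, rfl⟩
    have hr0mem : r0 ∈ remaining_sizes :=
      (PySem.List.mem_sorted ..).mp (hrs ▸ List.mem_cons_self ..)
    have hmr : m = r0 :=
      le_antisymm (PySem.List.key_head_sorted_rev_ge remaining_sizes (fun x => x) hrs m (PySem.List.max?_mem hm))
        (PySem.List.max?_isMax hm r0 hr0mem)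
    rw [hm]
    by_cases hcs : comps = []
    · have hcs' : PySem.List.sorted (comps.map (fun c => (c.length : Int))) (fun x => x) true
          = [] := by
        rw [hcs]
        rfl
      rw [hcs', if_neg (by simp)]
      have hvf : vf = [] := a9.mp hcs
      have hunil : unused = [] := by
        have h0 : unused.length = 0 := by rw [← hlen, hvf]; rfl
        exact List.eq_nil_of_length_eq_zero h0
      have hsum0 : remaining_sizes.sum = 0 := by
        rw [hunil] at hB
        simpa using hB.symm
      have hm0 : m ≤ 0 := by
        by_contra hpos
        exact hD ⟨hunil, hsum0, ⟨m, PySem.List.max?_mem hm, by omega⟩⟩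
      have hmc : mc = 0 := by rw [a7, hcs]; rfl
      rw [hmc]
      simp only [Option.getD_some]
      exact (decide_eq_true hm0).symm
    · have hcsne : comps.map (fun c => (c.length : Int)) ≠ [] := by
        simpa using hcs
      obtain ⟨c0, ct, hcssort⟩ : ∃ c0 ct,
          PySem.List.sorted (comps.map (fun c => (c.length : Int))) (fun x => x) true
            = c0 :: ct := by
        cases h : PySem.List.sorted (comps.map (fun c => (c.length : Int))) (fun x => x) true with
        | nil => exact absurd ((PySem.List.sorted_eq_nil_iff ..).mp h) hcsne
        | cons a t => exact ⟨a, t, rfl⟩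
      rw [hcssort, if_pos ⟨by simp, by rw [hrs]; simp⟩, hrs]
      simp only [List.headI, Option.getD_some]
      have hc0mem : c0 ∈ comps.map (fun c => (c.length : Int)) :=
        (PySem.List.mem_sorted ..).mp (hcssort ▸ List.mem_cons_self ..)
      have hc0ub : ∀ y ∈ comps.map (fun c => (c.length : Int)), y ≤ c0 :=
        PySem.List.key_head_sorted_rev_ge (comps.map (fun c => (c.length : Int))) (fun x => x) hcssort
      have hub : ∀ y ∈ comps.map (fun c => (c.length : Int)), y ≤ mc := by
        rw [a7]
        exact (PySem.List.le_foldl_max (comps.map (fun c => (c.length : Int))) 0).2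
      have hone' : 1 ≤ c0 := by
        obtain ⟨c, hc, rfl⟩ := List.mem_map.mp hc0mem
        exact_mod_cast a8 c hc
      have hmceq : mc = c0 := by
        rcases (by rw [a7]; exact PySem.List.foldl_max_mem (comps.map (fun c => (c.length : Int))) 0 :
            mc = 0 ∨ mc ∈ comps.map (fun c => (c.length : Int))) with h0 | hmem'
        · have := hub c0 hc0mem
          omega
        · exact le_antisymm (hc0ub mc hmem') (hub c0 hc0mem)
      rw [hmr, hmceq]
      by_cases hlt : c0 < r0
      · rw [if_pos hlt]
        exact (decide_eq_false (by omega : ¬ r0 ≤ c0)).symm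
      · rw [if_neg hlt]
        exact (decide_eq_true (by omega : r0 ≤ c0)).symm

-- ===== VERDICT (by name: the statement is the Claim_ definition above) =====
theorem can_satisfy_remaining_spec : Claim_unchanged_can_satisfy_remaining := by
  intro unused district_adj remaining_sizes _ hpre
  unfold Spec_can_satisfy_remaining
  intro hD
  unfold D_can_satisfy_remaining at hD
  obtain ⟨hnd, hp⟩ := hpre
  by_cases hrem : remaining_sizes = []
  · simp only [can_satisfy_remaining, can_satisfy_remaining_alt, if_pos hrem]
  · -- A's fold: components are exactly the connectivity classes of `unused`
    obtain ⟨a1, a2, a3, a4, a5, a6, a7⟩ :=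
      outerA unused district_adj hp unused [] [] (fun x hx => hx)
        List.nodup_nil (by simp) (by intro a ha; simp at ha)
        (by intro C hc; simp at hc) (by intro x hx; simp at hx) (by simp)
    -- B's fold: the quick-find labels induce the same classes
    have hinit : InvB unused district_adj
        (unused.foldl (fun d u => d.insert u u) PySem.Dict.empty) := by
      constructor
      · intro x
        rw [init_get]
        by_cases hx : x ∈ unused <;> simp [hx]
      · rintro x y ⟨w, hx, hy⟩
        rw [init_get] at hx hy
        by_cases hxu : x ∈ unused
        · rw [if_pos hxu] at hx
          by_cases hyu : y ∈ unused
          · rw [if_pos hyu] at hy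
            obtain rfl := Option.some.inj hx
            obtain rfl := Option.some.inj hy
            exact Reach.root _ (List.mem_singleton.mpr rfl)
          · rw [if_neg hyu] at hy
            simp at hy
        · rw [if_neg hxu] at hx
          simp at hx
    obtain ⟨hinvF, -, hedgesF⟩ :=
      outerB unused district_adj hp unused
        (unused.foldl (fun d u => d.insert u u) PySem.Dict.empty) (fun x hx => hx) hinit
    -- each class size equals the size of the component containing its member
    have hsize : ∀ u ∈ unused, ∀ C, C ∈ (unused.foldl (fun (st : List (PySem.Set Int) × PySem.Set Int) start =>
          if start ∈ st.2 then st
          else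
            (st.1 ++ [(bfsLoop unused district_adj (PySem.Set.add st.2 start) [start] [start]).2],
              (bfsLoop unused district_adj (PySem.Set.add st.2 start) [start] [start]).1)) ([], [])).1 → u ∈ C →
        (unused.countP (fun w =>
            (unused.foldl (fun c u =>
              (adjGet district_adj u).foldl (fun c v => mergeEdge c u v) c)
              (unused.foldl (fun d u => d.insert u u) PySem.Dict.empty)).get? w ==
            (unused.foldl (fun c u =>
              (adjGet district_adj u).foldl (fun c v => mergeEdge c u v) c)
              (unused.foldl (fun d u => d.insert u u) PySem.Dict.empty)).get? u) : Int)
          = (C.length : Int) := by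
      intro u hu C hc huc
      obtain ⟨hCne, hCnd, hCsub, hCchar⟩ := a3 C hc
      obtain ⟨cu, hcu⟩ : ∃ c, (unused.foldl (fun c u =>
            (adjGet district_adj u).foldl (fun c v => mergeEdge c u v) c)
            (unused.foldl (fun d u => d.insert u u) PySem.Dict.empty)).get? u = some c :=
        Option.isSome_iff_exists.mp ((hinvF.1 u).mpr hu)
      have hmemfilter : ∀ z, z ∈ unused.filter (fun w =>
          (unused.foldl (fun c u =>
            (adjGet district_adj u).foldl (fun c v => mergeEdge c u v) c)
            (unused.foldl (fun d u => d.insert u u) PySem.Dict.empty)).get? w ==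
          (unused.foldl (fun c u =>
            (adjGet district_adj u).foldl (fun c v => mergeEdge c u v) c)
            (unused.foldl (fun d u => d.insert u u) PySem.Dict.empty)).get? u) ↔ z ∈ C := by
        intro z
        rw [List.mem_filter]
        constructor
        · rintro ⟨hz, hbeq⟩
          have hzu : (unused.foldl (fun c u =>
              (adjGet district_adj u).foldl (fun c v => mergeEdge c u v) c)
              (unused.foldl (fun d u => d.insert u u) PySem.Dict.empty)).get? z
              = some cu := by
            rw [beq_iff_eq] at hbeq
            rw [hbeq, hcu]
          have hreach : Reach (adjGet district_adj) unused [] [z] u :=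
            hinvF.2 z u ⟨cu, hzu, hcu⟩
          have hback := (reach_symm (adjGet district_adj) unused hp z hz u hreach).2
          exact (hCchar u huc z).mpr ⟨hz, hback⟩
        · intro hzC
          obtain ⟨hz, hreach⟩ := (hCchar u huc z).mp hzC
          obtain ⟨-, w, huw, hzw⟩ :=
            reach_to_eqv unused district_adj _ hinvF hedgesF u z hu hreach
          refine ⟨hz, ?_⟩
          rw [beq_iff_eq, hzw, hcu, huw.symm.trans hcu]
      have hfnd : (unused.filter (fun w =>
          (unused.foldl (fun c u =>
            (adjGet district_adj u).foldl (fun c v => mergeEdge c u v) c)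
            (unused.foldl (fun d u => d.insert u u) PySem.Dict.empty)).get? w ==
          (unused.foldl (fun c u =>
            (adjGet district_adj u).foldl (fun c v => mergeEdge c u v) c)
            (unused.foldl (fun d u => d.insert u u) PySem.Dict.empty)).get? u)).Nodup :=
        hnd.filter _
      have hperm := (List.perm_ext_iff_of_nodup hfnd hCnd).mpr hmemfilter
      rw [List.countP_eq_length_filter]
      exact_mod_cast congrArg Nat.cast hperm.length_eq
    -- the running max over class sizes is the max over component sizes
    have hmaxeq : (unused.foldl (fun m u =>
          let size : Int := (unused.countP (fun w =>
            (unused.foldl (fun c u =>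
              (adjGet district_adj u).foldl (fun c v => mergeEdge c u v) c)
              (unused.foldl (fun d u => d.insert u u) PySem.Dict.empty)).get? w ==
            (unused.foldl (fun c u =>
              (adjGet district_adj u).foldl (fun c v => mergeEdge c u v) c)
              (unused.foldl (fun d u => d.insert u u) PySem.Dict.empty)).get? u) : Int)
          if m < size then size else m) 0)
        = (((unused.foldl (fun (st : List (PySem.Set Int) × PySem.Set Int) start =>
          if start ∈ st.2 then st
          else
            (st.1 ++ [(bfsLoop unused district_adj (PySem.Set.add st.2 start) [start] [start]).2],
              (bfsLoop unused district_adj (PySem.Set.add st.2 start) [start] [start]).1)) ([], [])).1).map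
              (fun c => (c.length : Int))).foldl (fun m s => max m s) 0 := by
      rw [foldl_if_max]
      apply foldl_max_eq
      · intro a ha
        obtain ⟨u, hu, rfl⟩ := List.mem_map.mp ha
        obtain ⟨C, hc, huc⟩ := a4 u (a6 u hu)
        rw [hsize u hu C hc huc]
        exact List.mem_map.mpr ⟨C, hc, rfl⟩
      · intro b hb
        obtain ⟨C, hc, rfl⟩ := List.mem_map.mp hb
        obtain ⟨hCne, -, -, hCchar⟩ := a3 C hc
        obtain ⟨u, huC⟩ := List.exists_mem_of_ne_nil C hCne
        have hu : u ∈ unused := ((hCchar u huC u).mp huC).1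
        rw [← hsize u hu C hc huC]
        exact List.mem_map.mpr ⟨u, hu, rfl⟩
    simp only [can_satisfy_remaining, can_satisfy_remaining_alt, if_neg hrem]
    refine final_lemma unused remaining_sizes _ _ _ hrem hnd a1 a2 a6 a5 (by exact hmaxeq) ?_ ?_ hD
    · intro c hc
      have := (a3 c hc).1
      cases c with
      | nil => exact absurd rfl this
      | cons x t => simp
    · constructor
      · intro h
        refine List.eq_nil_iff_forall_not_mem.mpr ?_
        intro x hx
        obtain ⟨C, hc, -⟩ := a4 x hx
        rw [h] at hc
        simp at hc
      · intro h
        refine List.eq_nil_iff_forall_not_mem.mpr ?_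
        intro C hc
        obtain ⟨hCne, -, hCsub, -⟩ := a3 C hc
        obtain ⟨x, hxC⟩ := List.exists_mem_of_ne_nil C hCne
        have := hCsub x hxC
        rw [h] at this
        simp at this

theorem can_satisfy_remaining_changed : Claim_changed_can_satisfy_remaining := by
  unfold Claim_changed_can_satisfy_remaining; decide

theorem can_satisfy_remaining_tight : Claim_exact_can_satisfy_remaining := by
  intro unused district_adj remaining_sizes _ _ hD
  obtain ⟨hunil, hsum0, x, hxmem, hxpos⟩ := hD
  subst hunil
  have hrem : remaining_sizes ≠ [] := fun h => by simp [h] at hxmem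
  obtain ⟨m, hm⟩ : ∃ m, PySem.List.max? remaining_sizes (fun x => x) = some m := by
    cases h : PySem.List.max? remaining_sizes (fun x => x) with
    | none => exact absurd ((PySem.List.max?_eq_none_iff ..).mp h) hrem
    | some m => exact ⟨m, rfl⟩
  have hmpos : 0 < m := lt_of_lt_of_le hxpos (PySem.List.max?_isMax hm x hxmem)
  have hA : can_satisfy_remaining [] district_adj remaining_sizes = true := by
    simp only [can_satisfy_remaining, if_neg hrem]
    rw [if_neg (by
      simp only [List.foldl_nil]
      rw [show PySem.List.sorted (([] : List (PySem.Set Int)).map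
            (fun c => (c.length : Int))) (fun x => x) true = [] from rfl]
      rw [(PySem.List.sorted_perm ..).sum_eq]
      simpa using hsum0.symm)]
    rw [if_neg (by
      simp only [List.foldl_nil]
      rw [show PySem.List.sorted (([] : List (PySem.Set Int)).map
            (fun c => (c.length : Int))) (fun x => x) true = [] from rfl]
      rintro ⟨h, -⟩
      exact h rfl)]
  have hB : can_satisfy_remaining_alt [] district_adj remaining_sizes = false := by
    simp only [can_satisfy_remaining_alt, if_neg hrem]
    rw [if_neg (by
      simp only [List.length_nil, Nat.cast_zero]
      omega)]
    simp only [List.foldl_nil, hm, Option.getD_some]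
    simp only [decide_eq_false_iff_not]
    omega
  rw [hA, hB]
  simp
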